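-- pv_equiv track=rewrite | github.com/wimglenn/advent-of-code-wim | aoc2016/q09.py | part2
-- ===== SOURCE A (Python) =====
-- from collections import deque
--
-- def get_marker(iterator):
--     marker = ''
--     for c in iterator:
--         if c == ')':
--             break
--         marker += c
--     duration, multiplier = [int(n) for n in marker.split('x')]
--     length = len(marker) + 2
--     return [duration, multiplier, length]
--
-- def parse(s):
--     parsed = deque()
--     iterator = iter(s)
--     while True:
--         letter = next(iterator, None)
--         if letter is None:
--             break
--         if letter == '(':
--             parsed.append(get_marker(iterator))
--         else:
--             parsed.append(1)
--     return parsed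
--
-- def part2(s):
--     parsed = parse(s)
--     result = 0
--     while True:
--         try:
--             x = parsed.popleft()
--         except IndexError:
--             break
--         if isinstance(x, int):
--             result += x
--         else:
--             duration, multiplier, length = x
--             i = 0
--             while duration > 0:
--                 if isinstance(parsed[i], int):
--                     duration -= 1
--                     parsed[i] *= multiplier
--                 else:
--                     duration -= parsed[i][2]
--                 i += 1
--     return result
-- ===== SOURCE B (Python) =====
-- def part2(s):
--     total = 0
--     stack = []  # active markers: (remaining raw-chars in span, multiplier)
--     i = 0
--     n = len(s)
--     while i < n:
--         if s[i] == '(':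
--             j = s.find(')', i)
--             body = s[i + 1:j] if j != -1 else s[i + 1:]
--             length = len(body) + 2
--             d, m = [int(x) for x in body.split('x')]
--             stack = [(r, mu) for (r, mu) in
--                      [(d, m)] + [(r - length, mu) for (r, mu) in stack]
--                      if r > 0]
--             i = j + 1 if j != -1 else n
--         else:
--             p = 1
--             for _, mu in stack:
--                 p *= mu
--             total += p
--             stack = [(r - 1, mu) for (r, mu) in stack if r > 1]
--             i += 1
--     return total
-- ===== Notes on version B (the rewrite author's own statement) =====
-- stated objective: alternative
-- what changed: Replaces A's token deque, where each popped marker re-walks and multiplies the following entries in place, by a single left-to-right pass over the string carrying a stack of active (remaining-span, multiplier) markers whose multiplier product weights each plain character.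
-- crash fix: On well-formed input where some marker's duration exceeds the length of the remaining text, A raises IndexError walking off the deque; B lets the span end with the text and returns the total. — e.g. on part2("(3x2)ab"): A raises IndexError, B returns 4
import Mathlib
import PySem

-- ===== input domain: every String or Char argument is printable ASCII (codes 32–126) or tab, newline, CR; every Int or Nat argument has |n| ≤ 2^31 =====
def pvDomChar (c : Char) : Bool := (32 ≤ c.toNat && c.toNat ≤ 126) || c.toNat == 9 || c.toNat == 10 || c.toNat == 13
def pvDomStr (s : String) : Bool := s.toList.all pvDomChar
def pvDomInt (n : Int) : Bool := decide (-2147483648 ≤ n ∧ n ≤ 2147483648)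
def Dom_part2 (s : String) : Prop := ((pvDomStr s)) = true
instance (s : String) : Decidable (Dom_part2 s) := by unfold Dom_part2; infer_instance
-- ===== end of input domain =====

-- B replaces A's token deque, in which each popped marker re-walks and multiplies the
-- following entries in place, by one left-to-right pass carrying a stack of active
-- (remaining-span, multiplier) markers whose product weights each plain character.

-- shared tiny helper (both Pythons parse the marker body "AxB" the same way):
-- marker body -> (duration, multiplier); Python raises ValueError where this defaults to 0 —
-- those inputs are excluded by Pre_part2.
def markerVals (body : List Char) : Int × Int :=
  match PySem.Chars.splitOn body ['x'] with
  | [a, b] => ((PySem.Int.ofChars? a).getD 0, (PySem.Int.ofChars? b).getD 0)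
  | _ => (0, 0)

-- ===== PORT A =====
inductive Tok where
  | ch : Int → Tok                 -- a letter slot, carrying its (possibly multiplied) weight
  | mark : Int → Int → Int → Tok   -- duration, multiplier, raw length
  deriving DecidableEq, Repr

-- get_marker: consume up to ')' (the ')' itself is consumed too)
def getMarker (cs : List Char) : (Int × Int × Int) × List Char :=
  let body := cs.takeWhile (· ≠ ')')
  ((( markerVals body).1, (markerVals body).2, (body.length : Int) + 2),
   (cs.dropWhile (· ≠ ')')).drop 1)

lemma getMarker_rest_le (cs : List Char) : (getMarker cs).2.length ≤ cs.length := by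
  simp only [getMarker]
  have := List.length_dropWhile_le (fun c => decide (c ≠ ')')) cs
  simp only [List.length_drop]; omega

-- parse: each letter becomes the int 1, each '(' a marker triple
def parseTok : List Char → List Tok
  | [] => []
  | c :: cs =>
    if c = '(' then
      Tok.mark (getMarker cs).1.1 (getMarker cs).1.2.1 (getMarker cs).1.2.2
        :: parseTok (getMarker cs).2
    else Tok.ch 1 :: parseTok cs
termination_by cs => cs.length
decreasing_by
  · have := getMarker_rest_le cs; simp only [List.length_cons]; omega
  · simp

-- the inner `while duration > 0` walk: multiply int slots, skip markers by their length
-- (where Python would raise IndexError past the end — excluded by Pre_part2 — this stops)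
def innerA (d m : Int) : List Tok → List Tok
  | [] => []
  | t :: ts =>
    if d ≤ 0 then t :: ts
    else match t with
      | Tok.ch k => Tok.ch (k * m) :: innerA (d - 1) m ts
      | Tok.mark d' m' l => Tok.mark d' m' l :: innerA (d - l) m ts

lemma length_innerA (d m : Int) (ts : List Tok) : (innerA d m ts).length = ts.length := by
  induction ts generalizing d with
  | nil => simp [innerA]
  | cons t ts ih =>
    cases t <;> simp only [innerA] <;> split <;> simp [ih]

-- the outer popleft loop
def goA : List Tok → Int → Int
  | [], r => r
  | Tok.ch k :: ts, r => goA ts (r + k)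
  | Tok.mark d m _ :: ts, r => goA (innerA d m ts) r
termination_by ts => ts.length
decreasing_by
  · simp
  · simp [length_innerA]

def part2 (s : String) : Int := goA (parseTok s.toList) 0

-- ===== PORT B =====
-- single pass; stack holds (remaining raw-chars of the span, multiplier), only positive remainders kept
def goB : List Char → List (Int × Int) → Int → Int
  | [], _, r => r
  | c :: cs, st, r =>
    if c = '(' then
      goB ((cs.dropWhile (· ≠ ')')).drop 1)
        ((((markerVals (cs.takeWhile (· ≠ ')'))).1, (markerVals (cs.takeWhile (· ≠ ')'))).2) ::
            st.map (fun p => (p.1 - (((cs.takeWhile (· ≠ ')')).length : Int) + 2), p.2))).filter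
          (fun p => decide (0 < p.1)))
        r
    else
      goB cs ((st.filter (fun p => decide (1 < p.1))).map (fun p => (p.1 - 1, p.2)))
        (r + st.foldl (fun p q => p * q.2) 1)
termination_by cs => cs.length
decreasing_by
  · have := List.length_dropWhile_le (fun c => decide (c ≠ ')')) cs
    simp only [List.length_drop, List.length_cons]; omega
  · simp

def part2_alt (s : String) : Int := goB s.toList [] 0

-- ===== PRECONDITION & SPEC =====
-- every '(' starts a marker whose body "AxB" (the chars up to the next ')') has exactly
-- one 'x' and two Python-int-parseable parts (else A raises ValueError in get_marker)
def bodyOk (body : List Char) : Bool :=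
  match PySem.Chars.splitOn body ['x'] with
  | [a, b] => (PySem.Int.ofChars? a).isSome && (PySem.Int.ofChars? b).isSome
  | _ => false

def synOk (cs : List Char) : Bool :=
  (List.range cs.length).all fun i =>
    !(cs.getD i ' ' = '(') || bodyOk ((cs.drop (i + 1)).takeWhile (· ≠ ')'))

-- no marker's positive duration exceeds the raw length of the text after its ')'
-- (else A's inner walk runs off the deque and raises IndexError)
def noOver (cs : List Char) : Bool :=
  (List.range cs.length).all fun i =>
    !(cs.getD i ' ' = '(') ||
      decide ((markerVals ((cs.drop (i + 1)).takeWhile (· ≠ ')'))).1 ≤ 0 ∨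
              (markerVals ((cs.drop (i + 1)).takeWhile (· ≠ ')'))).1
                ≤ ((((cs.drop (i + 1)).dropWhile (· ≠ ')')).drop 1).length : Int))

-- Pre_ excludes exactly the inputs on which A raises: malformed marker bodies (ValueError)
-- and markers whose span overruns the remaining text (IndexError).
def Pre_part2 (s : String) : Prop := synOk s.toList = true ∧ noOver s.toList = true
instance (s : String) : Decidable (Pre_part2 s) := by unfold Pre_part2; infer_instance

def pvWitness_part2 : String := "x(8x2)(3x3)abcy"

-- On syntactically well-formed input with a marker span overrunning the remaining text,
-- A raises IndexError while B simply lets the span end with the text and returns the total.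
def Raises_part2 (s : String) : Prop := synOk s.toList = true ∧ noOver s.toList = false
instance (s : String) : Decidable (Raises_part2 s) := by unfold Raises_part2; infer_instance
def pvRaiseWitness_part2 : String := "(3x2)ab"
def pvRaiseWitnessOut_part2 : Int := 4

def Spec_part2 (s : String) (out : Int) : Prop := out = part2_alt s
instance (s : String) (out : Int) : Decidable (Spec_part2 s out) := by unfold Spec_part2; infer_instance

-- ===== CLAIM (what is proved, stated in full; the proofs are below) =====
def Claim_equal_part2 : Prop := ∀ (s : String), Dom_part2 s → Pre_part2 s → Spec_part2 s (part2 s)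
def Claim_raises_part2 : Prop := (∀ (s : String), Dom_part2 s → Raises_part2 s → ¬ Pre_part2 s) ∧
  (Dom_part2 (pvRaiseWitness_part2) ∧ Raises_part2 (pvRaiseWitness_part2) ∧
   part2_alt (pvRaiseWitness_part2) = pvRaiseWitnessOut_part2)

-- ===== LEMMAS AND PROOFS =====

-- reference function: lazy token walk with the marker stack
def prodM (st : List (Int × Int)) : Int := (st.map Prod.snd).prod

def S : List Tok → List (Int × Int) → Int
  | [], _ => 0
  | Tok.ch k :: ts, st =>
      k * prodM st + S ts ((st.filter (fun p => decide (1 < p.1))).map (fun p => (p.1 - 1, p.2)))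
  | Tok.mark d m l :: ts, st =>
      S ts (((d, m) :: st.map (fun p => (p.1 - l, p.2))).filter (fun p => decide (0 < p.1)))

-- A's eager state: the stack's pending multiplications materialised into the token list
def applyStack : List (Int × Int) → List Tok → List Tok
  | [], ts => ts
  | p :: st, ts => innerA p.1 p.2 (applyStack st ts)

lemma innerA_nonpos (d m : Int) (ts : List Tok) (h : d ≤ 0) : innerA d m ts = ts := by
  cases ts <;> simp [innerA, h]

lemma applyStack_nil (st : List (Int × Int)) : applyStack st [] = [] := by
  induction st with
  | nil => rfl
  | cons p st ih => simp [applyStack, ih, innerA]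

lemma applyStack_filter (st : List (Int × Int)) (ts : List Tok) :
    applyStack (st.filter (fun p => decide (0 < p.1))) ts = applyStack st ts := by
  induction st with
  | nil => rfl
  | cons p st ih =>
    by_cases h : 0 < p.1
    · simp only [List.filter_cons, decide_eq_true_eq, if_pos h, applyStack, ih]
    · have hnp : p.1 ≤ 0 := by omega
      simp only [List.filter_cons, decide_eq_true_eq, if_neg h, ih, applyStack,
        innerA_nonpos p.1 p.2 (applyStack st ts) hnp]

lemma applyStack_ch (st : List (Int × Int)) (k : Int) (ts : List Tok)
    (h : ∀ p ∈ st, 0 < p.1) :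
    applyStack st (Tok.ch k :: ts)
      = Tok.ch (k * prodM st) :: applyStack (st.map (fun p => (p.1 - 1, p.2))) ts := by
  induction st generalizing k with
  | nil => simp [applyStack, prodM]
  | cons p st ih =>
    have hp : 0 < p.1 := h p (by simp)
    have hrec := ih k (fun q hq => h q (by simp [hq]))
    simp only [applyStack, hrec, innerA, if_neg (by omega : ¬ p.1 ≤ 0), List.map_cons]
    congr 2
    simp only [prodM, List.map_cons, List.prod_cons]
    ring

lemma applyStack_mark (st : List (Int × Int)) (d m l : Int) (ts : List Tok)
    (h : ∀ p ∈ st, 0 < p.1) :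
    applyStack st (Tok.mark d m l :: ts)
      = Tok.mark d m l :: applyStack (st.map (fun p => (p.1 - l, p.2))) ts := by
  induction st with
  | nil => simp [applyStack]
  | cons p st ih =>
    have hp : 0 < p.1 := h p (by simp)
    have hrec := ih (fun q hq => h q (by simp [hq]))
    simp only [applyStack, hrec, innerA, if_neg (by omega : ¬ p.1 ≤ 0)]
    rfl

lemma filter_pos_map_sub_one (st : List (Int × Int)) :
    (st.map (fun p => (p.1 - 1, p.2))).filter (fun p => decide (0 < p.1))
      = (st.filter (fun p => decide (1 < p.1))).map (fun p => (p.1 - 1, p.2)) := by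
  rw [List.filter_map]
  congr 1
  apply List.filter_congr
  intro p _
  simp only [Function.comp]
  rw [decide_eq_decide]
  omega

lemma goA_nil (r : Int) : goA [] r = r := by simp [goA]
lemma goA_ch (k : Int) (ts : List Tok) (r : Int) : goA (Tok.ch k :: ts) r = goA ts (r + k) := by
  rw [goA]
lemma goA_mark (d m l : Int) (ts : List Tok) (r : Int) :
    goA (Tok.mark d m l :: ts) r = goA (innerA d m ts) r := by rw [goA]

lemma goA_eq_S (ts : List Tok) : ∀ (st : List (Int × Int)) (r : Int),
    (∀ p ∈ st, 0 < p.1) → goA (applyStack st ts) r = r + S ts st := by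
  induction ts with
  | nil => intro st r _; simp [applyStack_nil, goA_nil, S]
  | cons t ts ih =>
    intro st r h
    cases t with
    | ch k =>
      rw [applyStack_ch st k ts h, goA_ch, ← applyStack_filter,
        ih _ _ (fun p hp => by have := List.of_mem_filter hp; simpa using this),
        filter_pos_map_sub_one]
      simp [S]; ring
    | mark d m l =>
      rw [applyStack_mark st d m l ts h, goA_mark]
      have hst : innerA d m (applyStack (st.map (fun p => (p.1 - l, p.2))) ts)
          = applyStack ((d, m) :: st.map (fun p => (p.1 - l, p.2))) ts := rfl
      rw [hst, ← applyStack_filter,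
        ih _ _ (fun p hp => by have := List.of_mem_filter hp; simpa using this)]
      rfl

lemma foldl_mul_snd (st : List (Int × Int)) : ∀ (a : Int),
    st.foldl (fun p q => p * q.2) a = a * prodM st := by
  induction st with
  | nil => simp [prodM]
  | cons p st ih => intro a; simp only [List.foldl, ih, prodM, List.map, List.prod_cons]; ring

lemma goB_eq_S (cs : List Char) : ∀ (st : List (Int × Int)) (r : Int),
    goB cs st r = r + S (parseTok cs) st := by
  induction cs using parseTok.induct with
  | case1 => intro st r; simp [goB, parseTok, S]
  | case2 cs ih =>
    intro st r
    simp only [getMarker] at ih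
    rw [goB, if_pos rfl, ih, parseTok, if_pos rfl]
    simp only [getMarker, S]
  | case3 c cs hc ih =>
    intro st r
    rw [goB, if_neg hc, ih, parseTok, if_neg hc]
    simp only [S, foldl_mul_snd]
    ring

theorem part2_spec : Claim_equal_part2 := by
  intro s _ _
  unfold Spec_part2 part2 part2_alt
  rw [goB_eq_S]
  have := goA_eq_S (parseTok s.toList) [] 0 (by simp)
  simpa [applyStack] using this

def part2_raises : Claim_raises_part2 := by
  unfold Claim_raises_part2
  constructor
  · intro s _ hr hp
    exact absurd hp.2 (by simp [hr.2])
  · refine ⟨by decide, by decide, ?_⟩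
    show part2_alt "(3x2)ab" = 4
    simp [part2_alt, goB, markerVals]
    decide
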